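-- pv_equiv track=rewrite | github.com/nicepyprod/csv-surgeon | csv_surgeon/rolling_window.py | window_context
-- ===== SOURCE A (Python) =====
-- from typing import Dict, Generator, Iterable, List, Optional
--
-- Row = Dict[str, str]
--
-- def _prefix_row(row: Row, prefix: str) -> Row:
--     return {f"{prefix}{k}": v for k, v in row.items()}
--
-- def window_context(
--     rows: Iterable[Row],
--     before: int = 1,
--     after: int = 1,
--     prefix_before: str = "prev_",
--     prefix_after: str = "next_",
--     fill: str = "",
-- ) -> Generator[Row, None, None]:
--     """Yield each row enriched with `before` preceding rows and `after` following rows.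
--
--     Missing context cells are filled with *fill* (default empty string).
--     """
--     if before < 0 or after < 0:
--         raise ValueError("before and after must be non-negative integers")
--
--     buffer: List[Row] = []
--     all_rows = list(rows)
--     if not all_rows:
--         return
--
--     header = list(all_rows[0].keys())
--     empty_row: Row = {k: fill for k in header}
--
--     for idx, row in enumerate(all_rows):
--         merged: Row = dict(row)
--
--         for lag in range(1, before + 1):
--             src = all_rows[idx - lag] if idx - lag >= 0 else empty_row
--             merged.update(_prefix_row(src, f"{prefix_before}{lag}_" if before > 1 else prefix_before))
--
--         for lead in range(1, after + 1):
--             src = all_rows[idx + lead] if idx + lead < len(all_rows) else empty_row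
--             merged.update(_prefix_row(src, f"{prefix_after}{lead}_" if after > 1 else prefix_after))
--
--         yield merged
-- ===== SOURCE B (Python) =====
-- def window_context(
--     rows,
--     before=1,
--     after=1,
--     prefix_before="prev_",
--     prefix_after="next_",
--     fill="",
-- ):
--     """Yield each row enriched with `before` preceding and `after` following rows.
--
--     Offset-major strategy: for each offset, shift-and-pad the row list once and
--     merge that whole column layer into the output rows in one zip pass,
--     with no per-row bounds check.
--     """
--     if before < 0 or after < 0:
--         raise ValueError("before and after must be non-negative integers")
--
--     all_rows = list(rows)
--     if not all_rows:
--         return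
--
--     n = len(all_rows)
--     header = list(all_rows[0].keys())
--     empty_row = {k: fill for k in header}
--
--     out = [dict(row) for row in all_rows]
--     for lag in range(1, before + 1):
--         pre = f"{prefix_before}{lag}_" if before > 1 else prefix_before
--         shifted = [empty_row] * min(lag, n) + all_rows[:max(n - lag, 0)]
--         for merged, src in zip(out, shifted):
--             merged.update({pre + k: v for k, v in src.items()})
--     for lead in range(1, after + 1):
--         pre = f"{prefix_after}{lead}_" if after > 1 else prefix_after
--         shifted = all_rows[min(lead, n):] + [empty_row] * min(lead, n)
--         for merged, src in zip(out, shifted):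
--             merged.update({pre + k: v for k, v in src.items()})
--
--     yield from out
-- ===== Notes on version B (the rewrite author's own statement) =====
-- stated objective: alternative
-- what changed: Instead of branching per row and per offset to pick each neighbour, B builds for every offset one shifted-and-prefixed column layer up front (pad with empty rows, slice to length, prefix once per layer) and then merges the layers into each row by plain indexing, with no bounds check in the row loop.
import Mathlib
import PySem

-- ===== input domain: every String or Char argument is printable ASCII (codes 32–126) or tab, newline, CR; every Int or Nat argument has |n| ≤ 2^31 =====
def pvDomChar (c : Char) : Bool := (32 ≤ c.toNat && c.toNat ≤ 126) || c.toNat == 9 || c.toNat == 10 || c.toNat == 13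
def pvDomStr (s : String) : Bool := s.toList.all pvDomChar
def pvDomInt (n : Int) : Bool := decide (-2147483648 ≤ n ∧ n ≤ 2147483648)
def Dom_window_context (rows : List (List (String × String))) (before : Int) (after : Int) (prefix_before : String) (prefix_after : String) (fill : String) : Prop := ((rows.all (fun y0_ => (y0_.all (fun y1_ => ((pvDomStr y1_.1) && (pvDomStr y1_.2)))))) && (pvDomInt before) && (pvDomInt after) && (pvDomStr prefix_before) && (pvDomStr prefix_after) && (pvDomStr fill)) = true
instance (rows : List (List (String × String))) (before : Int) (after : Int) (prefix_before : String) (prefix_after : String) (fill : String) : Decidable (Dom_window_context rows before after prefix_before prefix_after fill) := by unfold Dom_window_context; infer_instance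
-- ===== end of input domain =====

-- B replaces A's per-row/per-offset neighbour branching by an offset-major pass: per offset
-- one shifted-and-padded column merged into all output rows by a zip pass (alternative
-- decomposition, same cost). Both Pythons are generators; equivalence is about the yielded rows.

-- ===== PORT A =====
-- _prefix_row(row, prefix)
def pvPrefixRow (row : PySem.Dict String String) (pre : String) : PySem.Dict String String :=
  PySem.Dict.ofList (row.items.map (fun p => (pre ++ p.1, p.2)))

def window_context (rows : List (List (String × String))) (before : Int) (after : Int) (prefix_before : String) (prefix_after : String) (fill : String) : List (List (String × String)) :=
  if before < 0 ∨ after < 0 then []   -- Python raises ValueError here; excluded by Pre_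
  else
    let all_rows := rows.map PySem.Dict.ofList
    if all_rows = [] then []
    else
      let header := (PySem.List.pyGetD all_rows 0 PySem.Dict.empty).keys
      let empty_row := PySem.Dict.ofList (header.map (fun k => (k, fill)))
      (PySem.List.enumerate all_rows).map (fun p =>
        let merged := p.2
        let merged := (PySem.List.pyRange 1 (before + 1) 1).foldl (fun m lag =>
          let src := if 0 ≤ p.1 - lag then PySem.List.pyGetD all_rows (p.1 - lag) empty_row else empty_row
          m.update (pvPrefixRow src (if before > 1 then prefix_before ++ PySem.Int.toStr lag ++ "_" else prefix_before)).items) merged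
        let merged := (PySem.List.pyRange 1 (after + 1) 1).foldl (fun m lead =>
          let src := if p.1 + lead < (all_rows.length : Int) then PySem.List.pyGetD all_rows (p.1 + lead) empty_row else empty_row
          m.update (pvPrefixRow src (if after > 1 then prefix_after ++ PySem.Int.toStr lead ++ "_" else prefix_after)).items) merged
        merged.items)

-- ===== PORT B =====
def window_context_alt (rows : List (List (String × String))) (before : Int) (after : Int) (prefix_before : String) (prefix_after : String) (fill : String) : List (List (String × String)) :=
  if before < 0 ∨ after < 0 then []   -- Python raises ValueError here; excluded by Pre_
  else
    let all_rows := rows.map PySem.Dict.ofList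
    if all_rows = [] then []
    else
      let n : Int := (all_rows.length : Int)
      let header := (PySem.List.pyGetD all_rows 0 PySem.Dict.empty).keys
      let empty_row := PySem.Dict.ofList (header.map (fun k => (k, fill)))
      let out := all_rows   -- [dict(row) for row in all_rows]: fresh copies in Python, same values
      let out := (PySem.List.pyRange 1 (before + 1) 1).foldl (fun out lag =>
        let pre := if before > 1 then prefix_before ++ PySem.Int.toStr lag ++ "_" else prefix_before
        let shifted := List.replicate (min lag n).toNat empty_row ++ PySem.List.slice all_rows none (some (max (n - lag) 0))
        (out.zip shifted).map (fun q => q.1.update (pvPrefixRow q.2 pre).items)) out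
      let out := (PySem.List.pyRange 1 (after + 1) 1).foldl (fun out lead =>
        let pre := if after > 1 then prefix_after ++ PySem.Int.toStr lead ++ "_" else prefix_after
        let shifted := PySem.List.slice all_rows (some (min lead n)) none ++ List.replicate (min lead n).toNat empty_row
        (out.zip shifted).map (fun q => q.1.update (pvPrefixRow q.2 pre).items)) out
      out.map (fun m => m.items)

-- ===== PRECONDITION & SPEC =====
-- A raises ValueError when before < 0 or after < 0; exactly those inputs are excluded.
def Pre_window_context (rows : List (List (String × String))) (before : Int) (after : Int) (prefix_before : String) (prefix_after : String) (fill : String) : Prop :=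
  0 ≤ before ∧ 0 ≤ after
instance (rows : List (List (String × String))) (before : Int) (after : Int) (prefix_before : String) (prefix_after : String) (fill : String) : Decidable (Pre_window_context rows before after prefix_before prefix_after fill) := by unfold Pre_window_context; infer_instance

def pvWitness_window_context : (List (List (String × String))) × Int × Int × String × String × String :=
  ([[("a", "1"), ("b", "2")], [("a", "3"), ("b", "4")]], 1, 1, "prev_", "next_", "")

def Spec_window_context (rows : List (List (String × String))) (before : Int) (after : Int) (prefix_before : String) (prefix_after : String) (fill : String) (out : List (List (String × String))) : Prop := out = window_context_alt rows before after prefix_before prefix_after fill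
instance (rows : List (List (String × String))) (before : Int) (after : Int) (prefix_before : String) (prefix_after : String) (fill : String) (out : List (List (String × String))) : Decidable (Spec_window_context rows before after prefix_before prefix_after fill out) := by unfold Spec_window_context; infer_instance

-- ===== CLAIM (what is proved, stated in full; the proofs are below) =====
def Claim_equal_window_context : Prop := ∀ (rows : List (List (String × String))) (before : Int) (after : Int) (prefix_before : String) (prefix_after : String) (fill : String), Dom_window_context rows before after prefix_before prefix_after fill → Pre_window_context rows before after prefix_before prefix_after fill → Spec_window_context rows before after prefix_before prefix_after fill (window_context rows before after prefix_before prefix_after fill)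

-- ===== LEMMAS AND PROOFS =====

-- enumerate as a map over positions
theorem pv_enumerate_eq {α : Type} (xs : List α) (d : α) : ∀ (s : Int),
    PySem.List.enumerate xs s = (List.range xs.length).map (fun (i : Nat) => ((s + i : Int), xs.getD i d)) := by
  induction xs with
  | nil => intro s; simp [PySem.List.enumerate]
  | cons x xs ih =>
    intro s
    rw [PySem.List.enumerate_cons, ih (s + 1)]
    simp only [List.length_cons, List.range_succ_eq_map, List.map_cons, List.map_map]
    congr 1
    · simp
    · apply List.map_congr_left
      intro i _
      simp only [Function.comp_apply]
      rw [Prod.mk.injEq]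
      exact ⟨by push_cast; ring, by simp [List.getD_cons_succ]⟩

-- fold of whole-list zip passes = map of per-position folds (loop interchange)
theorem pv_fold_zip {α ω : Type} (d : α) (layer : ω → List α) (F : α → ω → α → α) :
    ∀ (ops : List ω) (out : List α), (∀ o ∈ ops, (layer o).length = out.length) →
    ops.foldl (fun acc o => (acc.zip (layer o)).map (fun q => F q.1 o q.2)) out
      = (List.range out.length).map (fun i => ops.foldl (fun m o => F m o ((layer o).getD i d)) (out.getD i d)) := by
  intro ops
  induction ops with
  | nil =>
    intro out _
    apply List.ext_getElem (by simp)
    intro i h1 h2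
    simp only [List.getElem_map, List.getElem_range, List.foldl_nil]
    rw [List.getD_eq_getElem _ _ (by simpa using h2)]
  | cons o ops ih =>
    intro out hlen
    have hlo : (layer o).length = out.length := hlen o (List.mem_cons_self ..)
    have hlen' : ((out.zip (layer o)).map (fun q => F q.1 o q.2)).length = out.length := by
      simp [List.length_zip, hlo]
    rw [List.foldl_cons, ih _ (fun o' ho' => by rw [hlen']; exact hlen o' (List.mem_cons_of_mem _ ho'))]
    rw [hlen']
    simp only [List.foldl_cons]
    apply List.map_congr_left
    intro i hi
    rw [List.mem_range] at hi
    congr 1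
    rw [List.getD_eq_getElem _ _ (by omega : i < ((out.zip (layer o)).map (fun q => F q.1 o q.2)).length)]
    simp only [List.getElem_map, List.getElem_zip]
    rw [List.getD_eq_getElem _ _ (by omega), List.getD_eq_getElem _ _ (by omega)]

-- B's "before" column at position i = A's conditional neighbour pick
theorem pv_layer_before {α : Type} (xs : List α) (e : α) (lag : Int) (i : Nat) (d : α)
    (hlag : 1 ≤ lag) (hi : i < xs.length) :
    (List.replicate (min lag (xs.length : Int)).toNat e ++
       PySem.List.slice xs none (some (max ((xs.length : Int) - lag) 0))).getD i d
      = if 0 ≤ (i : Int) - lag then PySem.List.pyGetD xs ((i : Int) - lag) e else e := by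
  rw [PySem.List.slice_to xs (by omega)]
  by_cases hc : 0 ≤ (i : Int) - lag
  · rw [if_pos hc, PySem.List.pyGetD_eq_getElem _ _ hc (by omega)]
    rw [List.getD_eq_getElem _ _ (by simp [List.length_replicate, List.length_take]; omega)]
    rw [List.getElem_append_right (by simp [List.length_replicate]; omega)]
    rw [List.getElem_take]
    congr 1
    simp [List.length_replicate]
    omega
  · rw [if_neg hc]
    rw [List.getD_eq_getElem _ _ (by simp [List.length_replicate, List.length_take]; omega)]
    rw [List.getElem_append_left (by simp [List.length_replicate]; omega)]
    exact List.getElem_replicate _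

-- B's "after" column at position i = A's conditional neighbour pick
theorem pv_layer_after {α : Type} (xs : List α) (e : α) (lead : Int) (i : Nat) (d : α)
    (hlead : 1 ≤ lead) (hi : i < xs.length) :
    (PySem.List.slice xs (some (min lead (xs.length : Int))) none ++
       List.replicate (min lead (xs.length : Int)).toNat e).getD i d
      = if (i : Int) + lead < (xs.length : Int) then PySem.List.pyGetD xs ((i : Int) + lead) e else e := by
  rw [PySem.List.slice_from xs (by omega)]
  by_cases hc : (i : Int) + lead < (xs.length : Int)
  · rw [if_pos hc, PySem.List.pyGetD_eq_getElem _ _ (by omega) (by omega)]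
    rw [List.getD_eq_getElem _ _ (by simp [List.length_replicate, List.length_drop]; omega)]
    rw [List.getElem_append_left (by simp [List.length_drop]; omega)]
    rw [List.getElem_drop]
    congr 1
    omega
  · rw [if_neg hc]
    rw [List.getD_eq_getElem _ _ (by simp [List.length_replicate, List.length_drop]; omega)]
    rw [List.getElem_append_right (by simp [List.length_drop]; omega)]
    exact List.getElem_replicate _

-- ===== VERDICT (by name: the statement is the Claim_ definition above) =====
theorem window_context_spec : Claim_equal_window_context := by
  intro rows before after prefix_before prefix_after fill _ hpre
  obtain ⟨hb, ha⟩ := hpre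
  unfold Spec_window_context window_context window_context_alt
  have hneg : ¬(before < 0 ∨ after < 0) := by omega
  by_cases hnil : rows.map PySem.Dict.ofList = []
  · simp only [if_neg hneg, if_pos hnil]
  · simp only [if_neg hneg, if_neg hnil]
    set all_rows := rows.map PySem.Dict.ofList with hall
    set empty_row := PySem.Dict.ofList
      (((PySem.List.pyGetD all_rows 0 PySem.Dict.empty).keys).map (fun k => (k, fill))) with hemp
    -- interchange B's two offset-major folds into per-position folds
    rw [pv_fold_zip PySem.Dict.empty
        (fun lag => List.replicate (min lag (all_rows.length : Int)).toNat empty_row ++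
          PySem.List.slice all_rows none (some (max ((all_rows.length : Int) - lag) 0)))
        (fun m lag src => m.update (pvPrefixRow src
          (if before > 1 then prefix_before ++ PySem.Int.toStr lag ++ "_" else prefix_before)).items)
        (PySem.List.pyRange 1 (before + 1) 1) all_rows
        (fun lag hlag => by
          rw [PySem.List.mem_pyRange_one] at hlag
          show (List.replicate (min lag (all_rows.length : Int)).toNat empty_row ++
            PySem.List.slice all_rows none (some (max ((all_rows.length : Int) - lag) 0))).length = _
          rw [PySem.List.slice_to all_rows (by omega)]
          simp [List.length_replicate, List.length_take]
          omega)]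
    rw [pv_fold_zip PySem.Dict.empty
        (fun lead => PySem.List.slice all_rows (some (min lead (all_rows.length : Int))) none ++
          List.replicate (min lead (all_rows.length : Int)).toNat empty_row)
        (fun m lead src => m.update (pvPrefixRow src
          (if after > 1 then prefix_after ++ PySem.Int.toStr lead ++ "_" else prefix_after)).items)
        (PySem.List.pyRange 1 (after + 1) 1) _
        (fun lead hlead => by
          rw [PySem.List.mem_pyRange_one] at hlead
          show (PySem.List.slice all_rows (some (min lead (all_rows.length : Int))) none ++
            List.replicate (min lead (all_rows.length : Int)).toNat empty_row).length = _
          rw [PySem.List.slice_from all_rows (by omega)]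
          simp [List.length_replicate, List.length_drop]
          try omega)]
    rw [pv_enumerate_eq all_rows PySem.Dict.empty 0]
    simp only [List.map_map, List.length_map, List.length_range]
    apply List.map_congr_left
    intro i hi
    rw [List.mem_range] at hi
    simp only [Function.comp_apply]
    conv_rhs => rw [List.getD_eq_getElem _ _ (by simp [List.length_map, List.length_range]; try omega)]
    simp only [List.getElem_map, List.getElem_range]
    simp only [zero_add]
    congr 1
    have hbf : List.foldl (fun (m : PySem.Dict String String) o => m.update (pvPrefixRow
          ((List.replicate (min o (all_rows.length : Int)).toNat empty_row ++
            PySem.List.slice all_rows none (some (max ((all_rows.length : Int) - o) 0))).getD i PySem.Dict.empty)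
          (if before > 1 then prefix_before ++ PySem.Int.toStr o ++ "_" else prefix_before)).items)
        (all_rows.getD i PySem.Dict.empty) (PySem.List.pyRange 1 (before + 1) 1)
      = List.foldl (fun (m : PySem.Dict String String) o => m.update (pvPrefixRow
          (if 0 ≤ (i : Int) - o then PySem.List.pyGetD all_rows ((i : Int) - o) empty_row else empty_row)
          (if before > 1 then prefix_before ++ PySem.Int.toStr o ++ "_" else prefix_before)).items)
        (all_rows.getD i PySem.Dict.empty) (PySem.List.pyRange 1 (before + 1) 1) :=
      PySem.List.foldl_congr_mem _ _ _ _ (fun acc o ho => by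
        rw [PySem.List.mem_pyRange_one] at ho
        rw [pv_layer_before all_rows empty_row o i PySem.Dict.empty (by omega) hi])
    rw [hbf]
    exact (PySem.List.foldl_congr_mem _ _ _ _ (fun acc o ho => by
      rw [PySem.List.mem_pyRange_one] at ho
      rw [pv_layer_after all_rows empty_row o i PySem.Dict.empty (by omega) hi])).symm
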